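-- pv_equiv track=rewrite | github.com/hoya54/BOJ | 3085.py | func
-- ===== SOURCE A (Python) =====
-- def func(ar, N):
--     large = 1
--     for i in range(N):
--         t = 1
--         for j in range(1, N):
--             if ar[i][j-1] == ar[i][j]:
--                 t += 1
--                 if t > large:
--                     large = t
--             else:
--                 t = 1
--         t=1
--         for j in range(1, N):
--             if ar[j-1][i] == ar[j][i]:
--                 t += 1
--                 if t > large:
--                     large = t
--             else:
--                 t = 1
--
--     return large
-- ===== SOURCE B (Python) =====
-- def func(ar, N):
--     # Divide & conquer per line: recursively split at the midpoint and merge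
--     # (best, prefix-run, suffix-run, first, last, length) summaries.
--     def solve(line):
--         n = len(line)
--         if n == 1:
--             return (1, 1, 1, line[0], line[0], 1)
--         mid = n // 2
--         bl, pl, sl, fl, ll, nl = solve(line[:mid])
--         br, pr, sr, fr, lr, nr = solve(line[mid:])
--         if ll == fr:
--             best = max(bl, br, sl + pr)
--             pre = nl + pr if pl == nl else pl
--             suf = sl + nr if sr == nr else sr
--         else:
--             best = max(bl, br)
--             pre, suf = pl, sr
--         return (best, pre, suf, fl, lr, nl + nr)
--
--     rows = [[ar[i][j] for j in range(N)] for i in range(N)]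
--     cols = [list(col) for col in zip(*rows)]
--     best = 1
--     for line in rows + cols:
--         best = max(best, solve(line)[0])
--     return best
-- ===== Notes on version B (the rewrite author's own statement) =====
-- stated objective: alternative
-- what changed: Replaces A's linear counter-with-reset scan of each row/column by a recursive divide-and-conquer: each line is split at its midpoint and (best, prefix-run, suffix-run, first, last, length) summaries are merged, the grid's columns being materialised via zip.
-- outside the precondition, e.g. on func([], 1): A returns 1, B raises IndexError
import Mathlib
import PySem

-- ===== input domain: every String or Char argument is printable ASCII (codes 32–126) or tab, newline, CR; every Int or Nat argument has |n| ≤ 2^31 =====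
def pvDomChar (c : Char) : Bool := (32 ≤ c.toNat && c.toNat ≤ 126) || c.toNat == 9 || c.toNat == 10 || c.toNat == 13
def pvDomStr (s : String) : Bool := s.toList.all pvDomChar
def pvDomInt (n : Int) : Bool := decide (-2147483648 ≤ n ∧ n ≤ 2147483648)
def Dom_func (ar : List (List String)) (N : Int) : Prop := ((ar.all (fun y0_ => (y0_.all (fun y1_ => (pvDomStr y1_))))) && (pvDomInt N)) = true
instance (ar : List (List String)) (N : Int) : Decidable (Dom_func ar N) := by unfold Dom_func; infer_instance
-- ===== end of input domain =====

-- B replaces A's counter-with-reset linear scan of each row/column by a recursive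
-- divide-and-conquer that splits every line at its midpoint and merges
-- (best, prefix-run, suffix-run, first, last, length) summaries (return value only, no mutation).

-- shared indexing helper: ar[i][j] (valid under Pre_; default values are never claimed)
def pvGet2 (ar : List (List String)) (i j : Int) : String :=
  PySem.List.pyGetD (PySem.List.pyGetD ar i []) j ""

-- ===== PORT A =====
def func (ar : List (List String)) (N : Int) : Int :=
  (PySem.List.pyRange 0 N 1).foldl (fun large i =>
    let r1 := (PySem.List.pyRange 1 N 1).foldl (fun (st : Int × Int) j =>
      if pvGet2 ar i (j-1) == pvGet2 ar i j then
        (st.1 + 1, if st.1 + 1 > st.2 then st.1 + 1 else st.2)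
      else (1, st.2)) (1, large)
    let r2 := (PySem.List.pyRange 1 N 1).foldl (fun (st : Int × Int) j =>
      if pvGet2 ar (j-1) i == pvGet2 ar j i then
        (st.1 + 1, if st.1 + 1 > st.2 then st.1 + 1 else st.2)
      else (1, st.2)) (1, r1.2)
    r2.2) 1

-- ===== PORT B =====
-- Source B's recursive divide-and-conquer 'solve': split at mid = n // 2 (line[:mid] = take,
-- line[mid:] = drop, exact for 0 ≤ mid ≤ n) and merge summaries.  The `line.length < 2`
-- guard is the Python `n == 1` base case plus a totality guard for [], which Source B never
-- reaches (it would recurse forever there).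
def pvSolve (line : List String) : Int × Int × Int × String × String × Int :=
  if _h : line.length < 2 then
    (1, 1, 1, PySem.List.pyGetD line 0 "", PySem.List.pyGetD line 0 "", 1)
  else
    match pvSolve (line.take (line.length / 2)), pvSolve (line.drop (line.length / 2)) with
    | (bl, pl, sl, fl, ll, nl), (br, pr, sr, fr, lr, nr) =>
      if ll == fr then
        (max (max bl br) (sl + pr),
         if pl == nl then nl + pr else pl,
         if sr == nr then sl + nr else sr,
         fl, lr, nl + nr)
      else
        (max bl br, pl, sr, fl, lr, nl + nr)
termination_by line.length
decreasing_by
  all_goals simp [List.length_take, List.length_drop]; omega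

def func_alt (ar : List (List String)) (N : Int) : Int :=
  let rows := (PySem.List.pyRange 0 N 1).map (fun i =>
    (PySem.List.pyRange 0 N 1).map (fun j => pvGet2 ar i j))
  let cols := (PySem.List.pyRange 0 N 1).map (fun j =>
    rows.map (fun row => PySem.List.pyGetD row j ""))
  (rows ++ cols).foldl (fun best line => max best (pvSolve line).1) 1

-- ===== PRECONDITION & SPEC =====
-- Pre_ excludes the inputs where Python raises IndexError: the grid must contain the full N×N
-- block.  For N == 1 A touches no cell and returns 1 even on a too-small grid, while B
-- materialises the block and raises there; those degenerate inputs are excluded too.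
def Pre_func (ar : List (List String)) (N : Int) : Prop :=
  N ≤ (ar.length : Int) ∧ ∀ row ∈ ar.take N.toNat, N ≤ (row.length : Int)
instance (ar : List (List String)) (N : Int) : Decidable (Pre_func ar N) := by
  unfold Pre_func; infer_instance

def pvWitness_func : List (List String) × Int := ([["a", "a"], ["b", "a"]], 2)

def Spec_func (ar : List (List String)) (N : Int) (out : Int) : Prop := out = func_alt ar N
instance (ar : List (List String)) (N : Int) (out : Int) : Decidable (Spec_func ar N out) := by
  unfold Spec_func; infer_instance

-- ===== CLAIM (what is proved, stated in full; the proofs are below) =====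
def Claim_equal_func : Prop := ∀ (ar : List (List String)) (N : Int),
  Dom_func ar N → Pre_func ar N → Spec_func ar N (func ar N)

-- ===== LEMMAS AND PROOFS =====

-- ---------- A-side characterisation ----------
-- max run length of g(s-1), g(s), …, g(e-1) weighted by the incoming counter k
def pvRm (g : Int → String) (c : String) (k : Int) (s e : Int) : Int :=
  if s < e then
    (if c == g s then pvRm g (g s) (k+1) (s+1) e else max k (pvRm g (g s) 1 (s+1) e))
  else k
termination_by (e - s).toNat
decreasing_by all_goals omega

-- list-structural twin of pvRm
def pvRmL (c : String) (k : Int) : List String → Int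
  | [] => k
  | x :: xs => if c == x then pvRmL x (k+1) xs else max k (pvRmL x 1 xs)

theorem pvRm_ge (g : Int → String) (e : Int) :
    ∀ (n : Nat) (s : Int), (e - s).toNat = n → ∀ (c : String) (k : Int),
    k ≤ pvRm g c k s e := by
  intro n
  induction n with
  | zero =>
    intro s hn c k
    have hse : ¬ s < e := by omega
    rw [pvRm, if_neg hse]
  | succ m ih =>
    intro s hn c k
    have hse : s < e := by omega
    rw [pvRm, if_pos hse]
    by_cases h : c == g s
    · rw [if_pos h]
      have := ih (s+1) (by omega) (g s) (k+1)
      omega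
    · rw [if_neg h]
      omega

theorem pvRmL_eq_pvRm (g : Int → String) (e : Int) :
    ∀ (n : Nat) (s : Int), (e - s).toNat = n → ∀ (c : String) (k : Int),
    pvRmL c k ((PySem.List.pyRange s e 1).map g) = pvRm g c k s e := by
  intro n
  induction n with
  | zero =>
    intro s hn c k
    have hse : ¬ s < e := by omega
    rw [PySem.List.pyRange_one_eq_nil (by omega)]
    rw [pvRm, if_neg hse]
    simp only [List.map_nil, pvRmL]
  | succ m ih =>
    intro s hn c k
    have hse : s < e := by omega
    rw [PySem.List.pyRange_one_cons hse]
    simp only [List.map_cons, pvRmL]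
    rw [pvRm, if_pos hse]
    by_cases h : c == g s
    · rw [if_pos h, if_pos h, ih (s+1) (by omega)]
    · rw [if_neg h, if_neg h, ih (s+1) (by omega)]

-- A's inner loop equals max of the incoming best with pvRm
theorem innerA_eq (g : Int → String) (e : Int) :
    ∀ (n : Nat) (s t a : Int), (e - s).toNat = n → 1 ≤ t → t ≤ a →
    ((PySem.List.pyRange s e 1).foldl (fun (st : Int × Int) j =>
      if g (j-1) == g j then
        (st.1 + 1, if st.1 + 1 > st.2 then st.1 + 1 else st.2)
      else (1, st.2)) (t, a)).2 = max a (pvRm g (g (s-1)) t s e) := by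
  intro n
  induction n with
  | zero =>
    intro s t a hn ht hta
    have hse : ¬ s < e := by omega
    rw [PySem.List.pyRange_one_eq_nil (by omega), pvRm, if_neg hse]
    simp only [List.foldl_nil]
    omega
  | succ m ih =>
    intro s t a hn ht hta
    have hse : s < e := by omega
    rw [PySem.List.pyRange_one_cons hse]
    simp only [List.foldl_cons]
    rw [pvRm, if_pos hse]
    by_cases h : g (s-1) == g s
    · rw [if_pos h, if_pos h]
      have ha' : (if t + 1 > a then t + 1 else a) = max a (t+1) := by split <;> omega
      have hr := pvRm_ge g e ((e-(s+1)).toNat) (s+1) rfl (g s) (t+1)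
      have := ih (s+1) (t+1) (if t + 1 > a then t + 1 else a) (by omega) (by omega) (by omega)
      simp only [add_sub_cancel_right] at this
      rw [this, ha']
      omega
    · rw [if_neg h, if_neg h]
      have := ih (s+1) 1 a (by omega) (by omega) (by omega)
      simp only [add_sub_cancel_right] at this
      rw [this]
      omega

-- pull a trailing max out of a max-fold
theorem foldl_max_out (f : Int → Int) (l : List Int) :
    ∀ (a c : Int),
    l.foldl (fun a i => max a (f i)) (max a c) = max (l.foldl (fun a i => max a (f i)) a) c := by
  induction l with
  | nil => intro a c; simp
  | cons x xs ih =>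
    intro a c
    simp only [List.foldl_cons]
    have : max (max a c) (f x) = max (max a (f x)) c := by omega
    rw [this, ih]

-- an interleaved max-fold splits into two sequential max-folds
theorem foldl_max_pair (R C : Int → Int) (l : List Int) :
    ∀ (a : Int),
    l.foldl (fun a i => max (max a (R i)) (C i)) a
      = l.foldl (fun a i => max a (C i)) (l.foldl (fun a i => max a (R i)) a) := by
  induction l with
  | nil => intro a; simp
  | cons x xs ih =>
    intro a
    simp only [List.foldl_cons]
    rw [ih, foldl_max_out R xs (max a (R x)) (C x)]

-- A's outer loop as an interleaved max-fold (invariant 1 ≤ a)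
theorem outerA_eq (ar : List (List String)) (N : Int) (l : List Int) :
    ∀ (a : Int), 1 ≤ a →
    l.foldl (fun large i =>
      let r1 := (PySem.List.pyRange 1 N 1).foldl (fun (st : Int × Int) j =>
        if pvGet2 ar i (j-1) == pvGet2 ar i j then
          (st.1 + 1, if st.1 + 1 > st.2 then st.1 + 1 else st.2)
        else (1, st.2)) (1, large)
      let r2 := (PySem.List.pyRange 1 N 1).foldl (fun (st : Int × Int) j =>
        if pvGet2 ar (j-1) i == pvGet2 ar j i then
          (st.1 + 1, if st.1 + 1 > st.2 then st.1 + 1 else st.2)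
        else (1, st.2)) (1, r1.2)
      r2.2) a
    = l.foldl (fun a i =>
        max (max a (pvRm (fun j => pvGet2 ar i j) (pvGet2 ar i 0) 1 1 N))
          (pvRm (fun j => pvGet2 ar j i) (pvGet2 ar 0 i) 1 1 N)) a := by
  induction l with
  | nil => intro a _; rfl
  | cons x xs ih =>
    intro a ha
    simp only [List.foldl_cons]
    have h1 := innerA_eq (fun j => pvGet2 ar x j) N ((N - 1).toNat) 1 1 a rfl (by omega) ha
    simp only [show (1 : Int) - 1 = 0 from rfl] at h1
    have h2 := innerA_eq (fun j => pvGet2 ar j x) N ((N - 1).toNat) 1 1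
      (max a (pvRm (fun j => pvGet2 ar x j) (pvGet2 ar x 0) 1 1 N)) rfl (by omega) (by omega)
    simp only [show (1 : Int) - 1 = 0 from rfl] at h2
    rw [h1, h2]
    exact ih _ (by omega)

-- ---------- B-side characterisation: run summaries ----------
-- length of the maximal constant prefix
def pvPre : List String → Int
  | [] => 0
  | [_] => 1
  | x :: y :: t => if x == y then 1 + pvPre (y :: t) else 1

-- length of the maximal constant suffix
def pvSuf (l : List String) : Int := pvPre l.reverse

-- longest constant run
def pvMaxRun : List String → Int
  | [] => 0
  | c :: rest => pvRmL c 1 rest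

theorem pvRmL_ge (xs : List String) : ∀ (c : String) (k : Int), k ≤ pvRmL c k xs := by
  induction xs with
  | nil => intro c k; simp [pvRmL]
  | cons x t ih =>
    intro c k
    simp only [pvRmL]
    by_cases h : c == x
    · rw [if_pos h]; have := ih x (k+1); omega
    · rw [if_neg h]; omega

theorem pvPre_pos (l : List String) (h : l ≠ []) : 1 ≤ pvPre l := by
  match l with
  | [_] => simp [pvPre]
  | x :: y :: t =>
    simp only [pvPre]
    have := pvPre_pos (y :: t) (by simp)
    split <;> omega

theorem pvPre_le (l : List String) : pvPre l ≤ (l.length : Int) := by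
  match l with
  | [] => simp [pvPre]
  | [_] => simp [pvPre]
  | x :: y :: t =>
    simp only [pvPre]
    have := pvPre_le (y :: t)
    simp only [List.length_cons] at *
    split <;> [push_cast; skip] <;> push_cast <;> omega

theorem pvSuf_pos (l : List String) (h : l ≠ []) : 1 ≤ pvSuf l :=
  pvPre_pos l.reverse (by simpa using h)

-- pvPre l = length l iff the whole list is one constant run
theorem pvPre_eq_len_iff (l : List String) : pvPre l = (l.length : Int) ↔ l.IsChain Eq := by
  match l with
  | [] => simpa [pvPre] using List.isChain_nil
  | [x] => simpa [pvPre] using List.isChain_singleton x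
  | x :: y :: t =>
    rw [List.isChain_cons_cons, ← pvPre_eq_len_iff (y :: t)]
    simp only [pvPre]
    by_cases hxy : x = y
    · have hb : (x == y) = true := by simpa using hxy
      rw [if_pos hb]
      have h1 := pvPre_pos (y :: t) (by simp)
      have h2 := pvPre_le (y :: t)
      simp only [List.length_cons] at *
      push_cast at *
      constructor
      · intro h; exact ⟨hxy, by omega⟩
      · intro h; omega
    · have hb : ¬ (x == y) = true := by simpa using hxy
      rw [if_neg hb]
      have h1 := pvPre_pos (y :: t) (by simp)
      have h2 := pvPre_le (y :: t)
      simp only [List.length_cons] at *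
      push_cast at *
      constructor
      · intro h; omega
      · intro h; exact absurd h.1 hxy

theorem pvSuf_eq_len_iff (l : List String) :
    pvSuf l = (l.length : Int) ↔ pvPre l = (l.length : Int) := by
  rw [pvPre_eq_len_iff]
  unfold pvSuf
  rw [show ((l.length : Int)) = (l.reverse.length : Int) by simp, pvPre_eq_len_iff,
    List.isChain_reverse]
  constructor
  · intro h; exact h.imp (fun _ _ hab => hab.symm)
  · intro h; exact h.imp (fun _ _ hab => hab.symm)

-- carried counter lemma: a run already k long behind us adds k-1 to the prefix run
theorem pvRmL_carry (rest : List String) :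
    ∀ (c : String) (k : Int), 1 ≤ k →
    pvRmL c k rest = max (pvRmL c 1 rest) (k - 1 + pvPre (c :: rest)) := by
  induction rest with
  | nil => intro c k hk; simp only [pvRmL, pvPre]; omega
  | cons x xs ih =>
    intro c k hk
    simp only [pvRmL]
    by_cases h : (c == x) = true
    · rw [if_pos h, if_pos h]
      rw [ih x (k+1) (by omega), ih x (1+1) (by omega)]
      have hp : pvPre (c :: x :: xs) = 1 + pvPre (x :: xs) := by
        simp only [pvPre, if_pos h]
      have := pvPre_pos (x :: xs) (by simp)
      rw [hp]
      omega
    · rw [if_neg h, if_neg h]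
      have hp : pvPre (c :: x :: xs) = 1 := by
        simp only [pvPre, if_neg h]
      have := pvRmL_ge xs x 1
      rw [hp]
      omega

-- prefix-run of an append
theorem pvPre_append (l1 l2 : List String) (h1 : l1 ≠ []) (h2 : l2 ≠ []) :
    pvPre (l1 ++ l2) =
      if pvPre l1 = (l1.length : Int) ∧ l1.getLastD "" = l2.headD "" then
        (l1.length : Int) + pvPre l2
      else pvPre l1 := by
  match l1, l2 with
  | [x], h :: r =>
    simp only [List.cons_append, List.nil_append, List.headD_cons]
    have hgl : ([x].getLastD "") = x := rfl
    rw [hgl]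
    by_cases hxh : x = h
    · have hb : (x == h) = true := by simpa using hxh
      have hpre : pvPre [x] = ((1 : Nat) : Int) := by simp [pvPre]
      rw [if_pos ⟨by simpa using hpre, hxh⟩]
      simp [pvPre, hb]
    · have hb : ¬ (x == h) = true := by simpa using hxh
      rw [if_neg (by intro hc; exact hxh hc.2)]
      simp [pvPre, hb]
  | x :: y :: t, h :: r =>
    have hrec := pvPre_append (y :: t) (h :: r) (by simp) (by simp)
    simp only [List.cons_append, List.headD_cons] at hrec ⊢
    have hlast : (x :: y :: t).getLastD "" = (y :: t).getLastD "" := by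
      simp
    rw [hlast]
    have hp1 := pvPre_pos (y :: t) (by simp)
    have hp2 := pvPre_le (y :: t)
    by_cases hxy : x = y
    · have hb : (x == y) = true := by simpa using hxy
      simp only [pvPre, hb, if_true]
      rw [hrec]
      by_cases hlh : (y :: t).getLastD "" = h
      · simp only [hlh, and_true, List.length_cons] at *
        push_cast at *
        split_ifs with h1 h2 <;> omega
      · simp only [hlh, and_false, if_false]
    · have hb : ¬ (x == y) = true := by simpa using hxy
      simp only [pvPre, if_neg hb]
      rw [if_neg]
      intro hc
      have := hc.1
      simp only [List.length_cons] at this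
      push_cast at this
      omega

theorem headD_reverse (l : List String) (d : String) : l.reverse.headD d = l.getLastD d := by
  simp [List.headD_eq_head?, List.head?_reverse, List.getLastD_eq_getLast?]

theorem getLastD_reverse (l : List String) (d : String) :
    l.reverse.getLastD d = l.headD d := by
  have := headD_reverse l.reverse d
  simpa using this.symm

-- suffix-run of an append
theorem pvSuf_append (l1 l2 : List String) (h1 : l1 ≠ []) (h2 : l2 ≠ []) :
    pvSuf (l1 ++ l2) =
      if pvSuf l2 = (l2.length : Int) ∧ l1.getLastD "" = l2.headD "" then
        pvSuf l1 + (l2.length : Int)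
      else pvSuf l2 := by
  unfold pvSuf
  rw [List.reverse_append,
    pvPre_append l2.reverse l1.reverse (by simpa using h2) (by simpa using h1)]
  rw [getLastD_reverse, headD_reverse]
  by_cases hc : pvPre l2.reverse = (l2.reverse.length : Int) ∧ l2.headD "" = l1.getLastD ""
  · rw [if_pos hc, if_pos ⟨by simpa using hc.1, hc.2.symm⟩]
    simp [add_comm]
  · rw [if_neg hc, if_neg (by
      intro h
      exact hc ⟨by simpa using h.1, h.2.symm⟩)]

-- the scan state after a block: continuing counter into the next block
theorem pvRmL_append (t : List String) :
    ∀ (c : String) (k : Int) (h : String) (r : List String),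
    pvRmL c k (t ++ h :: r) =
      max (pvRmL c k t)
        (if (c :: t).getLastD "" = h then
          pvRmL h ((if pvPre (c :: t) = ((c :: t).length : Int) then
              k - 1 + ((c :: t).length : Int) else pvSuf (c :: t)) + 1) r
        else pvRmL h 1 r) := by
  induction t with
  | nil =>
    intro c k h r
    simp only [List.nil_append, pvRmL]
    have hgl : ([c].getLastD "") = c := rfl
    rw [hgl]
    have hpre : pvPre [c] = ((1 : Nat) : Int) := by simp [pvPre]
    by_cases hch : c = h
    · have hb : (c == h) = true := by simpa using hch
      rw [if_pos hb, if_pos hch]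
      have h1 : pvPre [c] = (([c].length : Nat) : Int) := by simp [pvPre]
      rw [if_pos h1]
      have := pvRmL_ge r h (k + 1)
      have hk : k - 1 + (([c].length : Nat) : Int) + 1 = k + 1 := by
        simp only [List.length_cons, List.length_nil]
        push_cast
        ring
      rw [hk]
      omega
    · have hb : ¬ (c == h) = true := by simpa using hch
      rw [if_neg hb, if_neg hch]
  | cons x t' ih =>
    intro c k h r
    simp only [List.cons_append, pvRmL]
    have hlast : (c :: x :: t').getLastD "" = (x :: t').getLastD "" := by
      simp
    by_cases hcx : c = x
    · have hb : (c == x) = true := by simpa using hcx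
      rw [if_pos hb, if_pos hb, ih x (k+1) h r]
      congr 1
      rw [hlast]
      by_cases hlh : (x :: t').getLastD "" = h
      · rw [if_pos hlh, if_pos hlh]
        congr 2
        have hpc : pvPre (c :: x :: t') = 1 + pvPre (x :: t') := by
          simp only [pvPre, hb, if_true]
        by_cases hall : pvPre (x :: t') = ((x :: t').length : Int)
        · have hall2 : pvPre (c :: x :: t') = ((c :: x :: t').length : Int) := by
            rw [hpc, hall]; simp only [List.length_cons]; push_cast; ring
          rw [if_pos hall, if_pos hall2]
          simp only [List.length_cons]; push_cast; ring
        · have hall2 : ¬ pvPre (c :: x :: t') = ((c :: x :: t').length : Int) := by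
            rw [hpc]
            intro hx
            apply hall
            simp only [List.length_cons] at hx ⊢
            push_cast at hx ⊢
            omega
          rw [if_neg hall, if_neg hall2]
          -- pvSuf (c :: x :: t') = pvSuf (x :: t') since x :: t' is not all one run
          have hs := pvSuf_append [c] (x :: t') (by simp) (by simp)
          simp only [List.cons_append, List.nil_append] at hs
          rw [hs, if_neg]
          intro hcc
          exact hall ((pvSuf_eq_len_iff (x :: t')).mp hcc.1)
      · rw [if_neg hlh, if_neg hlh]
    · have hb : ¬ (c == x) = true := by simpa using hcx
      rw [if_neg hb, if_neg hb, ih x 1 h r]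
      have hEndK : (if (x :: t').getLastD "" = h then
            pvRmL h ((if pvPre (x :: t') = ((x :: t').length : Int) then
                1 - 1 + ((x :: t').length : Int) else pvSuf (x :: t')) + 1) r
          else pvRmL h 1 r)
          = (if (c :: x :: t').getLastD "" = h then
            pvRmL h ((if pvPre (c :: x :: t') = ((c :: x :: t').length : Int) then
                k - 1 + ((c :: x :: t').length : Int) else pvSuf (c :: x :: t')) + 1) r
          else pvRmL h 1 r) := by
        rw [hlast]
        by_cases hlh : (x :: t').getLastD "" = h
        · rw [if_pos hlh, if_pos hlh]
          congr 2
          have hall2 : ¬ pvPre (c :: x :: t') = ((c :: x :: t').length : Int) := by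
            simp only [pvPre, hb, List.length_cons]
            have ht : (0 : Int) ≤ (t'.length : Int) := by positivity
            push_cast
            omega
          rw [if_neg hall2]
          have hs := pvSuf_append [c] (x :: t') (by simp) (by simp)
          simp only [List.cons_append, List.nil_append, List.headD_cons] at hs
          rw [show ([c].getLastD "") = c from rfl] at hs
          rw [hs]
          by_cases hall : pvPre (x :: t') = ((x :: t').length : Int)
          · rw [if_pos hall]
            rw [if_neg (by intro hcc; exact hcx hcc.2)]
            have := (pvSuf_eq_len_iff (x :: t')).mpr hall
            rw [this]
            omega
          · rw [if_neg hall]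
            rw [if_neg (by intro hcc; exact hcx hcc.2)]
        · rw [if_neg hlh, if_neg hlh]
      rw [hEndK]
      omega

theorem getLastD_append_right (l1 : List String) :
    ∀ (a : String) (b : List String) (d : String),
    (l1 ++ a :: b).getLastD d = (a :: b).getLastD d := by
  induction l1 with
  | nil => intro a b d; rfl
  | cons y ys ih =>
    intro a b d
    rw [List.cons_append, List.getLastD_cons, ih a b y, List.getLastD_cons, List.getLastD_cons]

-- longest run of an append
theorem pvMaxRun_append (l1 l2 : List String) (h1 : l1 ≠ []) (h2 : l2 ≠ []) :
    pvMaxRun (l1 ++ l2) =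
      if l1.getLastD "" = l2.headD "" then
        max (max (pvMaxRun l1) (pvMaxRun l2)) (pvSuf l1 + pvPre l2)
      else max (pvMaxRun l1) (pvMaxRun l2) := by
  match l1, l2 with
  | c :: t, h :: r =>
    simp only [List.cons_append, pvMaxRun, List.headD_cons]
    rw [pvRmL_append t c 1 h r]
    by_cases hlh : (c :: t).getLastD "" = h
    · rw [if_pos hlh, if_pos hlh]
      have hcarry : ∀ m : Int, 1 ≤ m → pvRmL h m r = max (pvRmL h 1 r) (m - 1 + pvPre (h :: r)) :=
        fun m hm => pvRmL_carry r h m hm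
      by_cases hall : pvPre (c :: t) = ((c :: t).length : Int)
      · rw [if_pos hall]
        have hsuf : pvSuf (c :: t) = ((c :: t).length : Int) := (pvSuf_eq_len_iff _).mpr hall
        have hlen : (1 : Int) ≤ ((c :: t).length : Int) := by
          simp only [List.length_cons]; push_cast; omega
        rw [hcarry _ (by omega)]
        rw [hsuf]
        omega
      · rw [if_neg hall]
        have hsp : 1 ≤ pvSuf (c :: t) := pvSuf_pos _ (by simp)
        rw [hcarry _ (by omega)]
        omega
    · rw [if_neg hlh, if_neg hlh]

-- correctness of the divide-and-conquer summary
theorem pvSolve_correct : ∀ (n : Nat) (l : List String), l.length ≤ n → l ≠ [] →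
    pvSolve l = (pvMaxRun l, pvPre l, pvSuf l, l.headD "", l.getLastD "", (l.length : Int)) := by
  intro n
  induction n with
  | zero =>
    intro l hl hne
    cases l with
    | nil => exact absurd rfl hne
    | cons x t => simp at hl
  | succ m ih =>
    intro l hl hne
    by_cases hs : l.length < 2
    · match l with
      | [x] =>
        rw [pvSolve]
        simp [pvMaxRun, pvRmL, pvPre, pvSuf, PySem.List.pyGetD]
    · rw [not_lt] at hs
      rw [pvSolve]
      rw [dif_neg (by omega)]
      have hmid1 : 1 ≤ l.length / 2 := by omega
      have hmid2 : l.length / 2 < l.length := by omega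
      have hlt : (l.take (l.length / 2)).length = l.length / 2 := by
        simp [List.length_take]; omega
      have hld : (l.drop (l.length / 2)).length = l.length - l.length / 2 := by
        simp [List.length_drop]
      have ht_ne : l.take (l.length / 2) ≠ [] := by
        intro hx; rw [← List.length_eq_zero_iff] at hx; omega
      have hd_ne : l.drop (l.length / 2) ≠ [] := by
        intro hx; rw [← List.length_eq_zero_iff] at hx; omega
      rw [ih _ (by omega) ht_ne, ih _ (by omega) hd_ne]
      have happ : l.take (l.length / 2) ++ l.drop (l.length / 2) = l := List.take_append_drop _ _
      have hhead : l.headD "" = (l.take (l.length / 2)).headD "" := by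
        conv_lhs => rw [← happ]
        cases h' : l.take (l.length / 2) with
        | nil => exact absurd h' ht_ne
        | cons a b => simp
      have hlastl : l.getLastD "" = (l.drop (l.length / 2)).getLastD "" := by
        conv_lhs => rw [← happ]
        cases h' : l.drop (l.length / 2) with
        | nil => exact absurd h' hd_ne
        | cons a b => rw [getLastD_append_right]
      have hlen : ((l.length : Int)) =
          ((l.take (l.length / 2)).length : Int) + ((l.drop (l.length / 2)).length : Int) := by
        rw [hlt, hld]; push_cast; omega
      by_cases hb : (l.take (l.length / 2)).getLastD "" = (l.drop (l.length / 2)).headD ""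
      · have hbeq : ((l.take (l.length / 2)).getLastD "" ==
            (l.drop (l.length / 2)).headD "") = true := by simpa using hb
        simp only [hbeq, if_true]
        have hMR : pvMaxRun l = max (max (pvMaxRun (l.take (l.length / 2)))
            (pvMaxRun (l.drop (l.length / 2))))
            (pvSuf (l.take (l.length / 2)) + pvPre (l.drop (l.length / 2))) := by
          conv_lhs => rw [← happ]
          rw [pvMaxRun_append _ _ ht_ne hd_ne, if_pos hb]
        have hPRE : pvPre l =
            if pvPre (l.take (l.length / 2)) = ((l.take (l.length / 2)).length : Int) then
              ((l.take (l.length / 2)).length : Int) + pvPre (l.drop (l.length / 2))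
            else pvPre (l.take (l.length / 2)) := by
          conv_lhs => rw [← happ]
          rw [pvPre_append _ _ ht_ne hd_ne]
          by_cases hp : pvPre (l.take (l.length / 2)) = ((l.take (l.length / 2)).length : Int)
          · rw [if_pos ⟨hp, hb⟩, if_pos hp]
          · rw [if_neg (by intro hc; exact hp hc.1), if_neg hp]
        have hSUF : pvSuf l =
            if pvSuf (l.drop (l.length / 2)) = ((l.drop (l.length / 2)).length : Int) then
              pvSuf (l.take (l.length / 2)) + ((l.drop (l.length / 2)).length : Int)
            else pvSuf (l.drop (l.length / 2)) := by
          conv_lhs => rw [← happ]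
          rw [pvSuf_append _ _ ht_ne hd_ne]
          by_cases hp : pvSuf (l.drop (l.length / 2)) = ((l.drop (l.length / 2)).length : Int)
          · rw [if_pos ⟨hp, hb⟩, if_pos hp]
          · rw [if_neg (by intro hc; exact hp hc.1), if_neg hp]
        refine Prod.ext ?_ (Prod.ext ?_ (Prod.ext ?_ (Prod.ext ?_ (Prod.ext ?_ ?_))))
        · simpa using hMR.symm
        · simp only
          rw [hPRE]
          by_cases hp : pvPre (l.take (l.length / 2)) = ((l.take (l.length / 2)).length : Int)
          · have : (pvPre (l.take (l.length / 2)) == ((l.take (l.length / 2)).length : Int)) = true := by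
              simpa using hp
            rw [this, if_pos hp]
            simp
          · have : (pvPre (l.take (l.length / 2)) == ((l.take (l.length / 2)).length : Int)) = false := by
              simpa using hp
            rw [this, if_neg hp]
            simp
        · simp only
          rw [hSUF]
          by_cases hp : pvSuf (l.drop (l.length / 2)) = ((l.drop (l.length / 2)).length : Int)
          · have : (pvSuf (l.drop (l.length / 2)) == ((l.drop (l.length / 2)).length : Int)) = true := by
              simpa using hp
            rw [this, if_pos hp]
            simp
          · have : (pvSuf (l.drop (l.length / 2)) == ((l.drop (l.length / 2)).length : Int)) = false := by
              simpa using hp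
            rw [this, if_neg hp]
            simp
        · simpa using hhead.symm
        · simpa using hlastl.symm
        · simpa using hlen.symm
      · have hbeq : ((l.take (l.length / 2)).getLastD "" ==
            (l.drop (l.length / 2)).headD "") = false := by simpa using hb
        simp only [hbeq]
        have hMR : pvMaxRun l = max (pvMaxRun (l.take (l.length / 2)))
            (pvMaxRun (l.drop (l.length / 2))) := by
          conv_lhs => rw [← happ]
          rw [pvMaxRun_append _ _ ht_ne hd_ne, if_neg hb]
        have hPRE : pvPre l = pvPre (l.take (l.length / 2)) := by
          conv_lhs => rw [← happ]
          rw [pvPre_append _ _ ht_ne hd_ne, if_neg (by intro hc; exact hb hc.2)]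
        have hSUF : pvSuf l = pvSuf (l.drop (l.length / 2)) := by
          conv_lhs => rw [← happ]
          rw [pvSuf_append _ _ ht_ne hd_ne, if_neg (by intro hc; exact hb hc.2)]
        refine Prod.ext ?_ (Prod.ext ?_ (Prod.ext ?_ (Prod.ext ?_ (Prod.ext ?_ ?_))))
        · simpa using hMR.symm
        · simpa using hPRE.symm
        · simpa using hSUF.symm
        · simpa using hhead.symm
        · simpa using hlastl.symm
        · simpa using hlen.symm

-- per-line value of B on a nonempty line
theorem pvSolve_fst (c : String) (rest : List String) :
    (pvSolve (c :: rest)).1 = pvRmL c 1 rest := by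
  rw [pvSolve_correct (c :: rest).length (c :: rest) le_rfl (by simp)]
  simp [pvMaxRun]

theorem func_eq_alt (ar : List (List String)) (N : Int) : func ar N = func_alt ar N := by
  by_cases hN : N ≤ 0
  · rw [func, func_alt]
    simp only [PySem.List.pyRange_one_eq_nil (show N ≤ (0:Int) from hN)]
    simp
  · rw [func, func_alt]
    rw [outerA_eq ar N _ 1 (by omega)]
    rw [foldl_max_pair (fun i => pvRm (fun j => pvGet2 ar i j) (pvGet2 ar i 0) 1 1 N)
        (fun i => pvRm (fun j => pvGet2 ar j i) (pvGet2 ar 0 i) 1 1 N) _ 1]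
    rw [List.foldl_append, List.foldl_map, List.foldl_map]
    -- rows part
    have hrow : ∀ (a i : Int),
        max a (pvSolve ((PySem.List.pyRange 0 N 1).map (fun j => pvGet2 ar i j))).1
        = max a (pvRm (fun j => pvGet2 ar i j) (pvGet2 ar i 0) 1 1 N) := by
      intro a i
      rw [PySem.List.pyRange_one_cons (by omega : (0:Int) < N), List.map_cons]
      rw [pvSolve_fst]
      simp only [show (0:Int)+1 = 1 from by norm_num]
      rw [pvRmL_eq_pvRm (fun j => pvGet2 ar i j) N ((N - 1).toNat) 1 (by omega)]
    -- columns part: each built column equals the direct column access, for 0 ≤ j < N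
    have hcolline : ∀ j : Int, 0 ≤ j → j < N →
        ((PySem.List.pyRange 0 N 1).map fun i =>
            (PySem.List.pyRange 0 N 1).map fun j => pvGet2 ar i j).map
          (fun row => PySem.List.pyGetD row j "")
        = (PySem.List.pyRange 0 N 1).map (fun i => pvGet2 ar i j) := by
      intro j hj0 hjN
      rw [List.map_map]
      refine List.map_congr_left ?_
      intro i _
      simp only [Function.comp]
      exact PySem.List.pyGetD_map_pyRange_of_nonneg (fun j => pvGet2 ar i j) N j "" hj0 hjN
    have hcol : ∀ (a j : Int), 0 ≤ j → j < N →
        max a (pvSolve (((PySem.List.pyRange 0 N 1).map fun i =>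
            (PySem.List.pyRange 0 N 1).map fun j => pvGet2 ar i j).map
          (fun row => PySem.List.pyGetD row j ""))).1
        = max a (pvRm (fun i => pvGet2 ar i j) (pvGet2 ar 0 j) 1 1 N) := by
      intro a j hj0 hjN
      rw [hcolline j hj0 hjN]
      rw [PySem.List.pyRange_one_cons (by omega : (0:Int) < N), List.map_cons]
      rw [pvSolve_fst]
      simp only [show (0:Int)+1 = 1 from by norm_num]
      rw [pvRmL_eq_pvRm (fun i => pvGet2 ar i j) N ((N - 1).toNat) 1 (by omega)]
    have hrowfold : (PySem.List.pyRange 0 N 1).foldl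
        (fun best i => max best (pvSolve ((PySem.List.pyRange 0 N 1).map
          (fun j => pvGet2 ar i j))).1) 1
        = (PySem.List.pyRange 0 N 1).foldl
            (fun a i => max a (pvRm (fun j => pvGet2 ar i j) (pvGet2 ar i 0) 1 1 N)) 1 := by
      refine PySem.List.foldl_congr_mem _ _ _ _ ?_
      intro acc i _
      exact hrow acc i
    rw [hrowfold]
    refine Eq.symm (PySem.List.foldl_congr_mem _ _ _ _ ?_)
    intro acc j hj
    have := (PySem.List.mem_pyRange_one).mp hj
    exact hcol acc j this.1 this.2

-- ===== VERDICT (by name: the statement is the Claim_ definition above) =====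
theorem func_spec : Claim_equal_func := by
  intro ar N _ _
  unfold Spec_func
  exact func_eq_alt ar N
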